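-- pv_equiv track=rewrite | github.com/saeronjhk-cloud/NutriLens | tools/food_analyzer.py | build_food_list_for_prompt
-- ===== SOURCE A (Python) =====
-- def build_food_list_for_prompt(foods):
--     """DB 음식 목록을 프롬프트에 넣을 간결한 텍스트로 변환"""
--     categories = {}
--     for f in foods:
--         cat = f.get('category', 'other')
--         if cat not in categories:
--             categories[cat] = []
--         categories[cat].append(f['name_ko'])
--
--     lines = []
--     cat_names = {
--         'korean': '한식',
--         'diet_fitness': '다이어트/피트니스',
--         'foreign_popular': '외국음식',
--         'franchise': '프랜차이즈',
--         'snack_drink': '간식/음료',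
--     }
--     for cat, names in categories.items():
--         label = cat_names.get(cat, cat)
--         lines.append(f"[{label}] {', '.join(names[:50])}")  # 카테고리당 최대 50개
--     return '\n'.join(lines)
-- ===== SOURCE B (Python) =====
-- def build_food_list_for_prompt(foods):
--     """DB 음식 목록을 프롬프트에 넣을 간결한 텍스트로 변환"""
--     cat_names = {
--         'korean': '한식',
--         'diet_fitness': '다이어트/피트니스',
--         'foreign_popular': '외국음식',
--         'franchise': '프랜차이즈',
--         'snack_drink': '간식/음료',
--     }
--     # pass 1: distinct categories in first-appearance order
--     order = []
--     seen = set()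
--     for f in foods:
--         c = f.get('category', 'other')
--         if c not in seen:
--             seen.add(c)
--             order.append(c)
--     # pass 2: per category, filter the names out of foods
--     lines = []
--     for cat in order:
--         names = [f['name_ko'] for f in foods if f.get('category', 'other') == cat]
--         lines.append("[%s] %s" % (cat_names.get(cat, cat), ', '.join(names[:50])))
--     return '\n'.join(lines)
-- ===== Notes on version B (the rewrite author's own statement) =====
-- stated objective: alternative
-- what changed: Replaces A's single-pass dict-of-lists grouping with a collect-distinct-categories pass followed by a fresh filtering pass over foods per category.
import Mathlib
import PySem

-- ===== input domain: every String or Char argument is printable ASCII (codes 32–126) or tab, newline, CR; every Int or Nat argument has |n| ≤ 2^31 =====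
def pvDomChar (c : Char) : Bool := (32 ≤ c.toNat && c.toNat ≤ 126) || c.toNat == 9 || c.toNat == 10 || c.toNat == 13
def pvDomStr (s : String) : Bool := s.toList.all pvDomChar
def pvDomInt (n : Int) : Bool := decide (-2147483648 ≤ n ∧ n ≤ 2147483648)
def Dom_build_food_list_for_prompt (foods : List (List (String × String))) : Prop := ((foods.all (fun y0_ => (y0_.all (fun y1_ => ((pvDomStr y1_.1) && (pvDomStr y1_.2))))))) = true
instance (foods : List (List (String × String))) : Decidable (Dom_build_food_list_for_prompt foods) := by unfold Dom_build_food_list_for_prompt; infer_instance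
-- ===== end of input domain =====

-- B replaces A's one-pass dict-of-lists grouping by a collect-distinct-categories pass
-- followed by a per-category filtering pass over foods (alternative decomposition, same result).


-- the fixed category-label table (cat_names in both Pythons)
def pvCatNames : PySem.Dict String String := PySem.Dict.ofList
  [("korean", "한식"), ("diet_fitness", "다이어트/피트니스"), ("foreign_popular", "외국음식"),
   ("franchise", "프랜차이즈"), ("snack_drink", "간식/음료")]

-- f.get('category', 'other')
def pvCatOf (f : List (String × String)) : String := (PySem.Dict.mk f).getD "category" "other"
-- f['name_ko']  (Pre_ guarantees the key is present; "" is never used inside Pre_)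
def pvNameOf (f : List (String × String)) : String := (PySem.Dict.mk f).getD "name_ko" ""
-- "[{label}] {', '.join(names[:50])}"
def pvLine (cat : String) (names : List String) : String :=
  "[" ++ pvCatNames.getD cat cat ++ "] " ++ PySem.Str.join ", " (names.take 50)

-- ===== PORT A =====
def build_food_list_for_prompt (foods : List (List (String × String))) : String :=
  let categories : PySem.Dict String (List String) :=
    foods.foldl (fun d f =>
      let cat := pvCatOf f
      let d := if d.contains cat then d else d.insert cat []
      d.modify cat [] (fun ns => ns ++ [pvNameOf f])) PySem.Dict.empty
  let lines := categories.items.map (fun p => pvLine p.1 p.2)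
  PySem.Str.join "\n" lines

-- ===== PORT B =====
def build_food_list_for_prompt_alt (foods : List (List (String × String))) : String :=
  let order : PySem.Set String := PySem.Set.ofList (foods.map pvCatOf)
  let lines := order.map (fun cat =>
    let names := (foods.filter (fun f => pvCatOf f == cat)).map pvNameOf
    pvLine cat names)
  PySem.Str.join "\n" lines

-- ===== PRECONDITION & SPEC =====
-- Pre_ excludes exactly the inputs where a food dict lacks 'name_ko', on which Python A
-- (and Python B) raise KeyError.
def Pre_build_food_list_for_prompt (foods : List (List (String × String))) : Prop :=
  (foods.all (fun f => (PySem.Dict.mk f).contains "name_ko")) = true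
instance (foods : List (List (String × String))) : Decidable (Pre_build_food_list_for_prompt foods) := by unfold Pre_build_food_list_for_prompt; infer_instance
def pvWitness_build_food_list_for_prompt : (List (List (String × String))) :=
  [[("name_ko", "kimchi"), ("category", "korean")], [("name_ko", "cola")]]
def Spec_build_food_list_for_prompt (foods : List (List (String × String))) (out : String) : Prop := out = build_food_list_for_prompt_alt foods
instance (foods : List (List (String × String))) (out : String) : Decidable (Spec_build_food_list_for_prompt foods out) := by unfold Spec_build_food_list_for_prompt; infer_instance

-- ===== CLAIM (what is proved, stated in full; the proofs are below) =====
def Claim_equal_build_food_list_for_prompt : Prop := ∀ (foods : List (List (String × String))), Dom_build_food_list_for_prompt foods → Pre_build_food_list_for_prompt foods → Spec_build_food_list_for_prompt foods (build_food_list_for_prompt foods)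

-- ===== LEMMAS AND PROOFS =====

-- A's "if absent insert []; then append" step is one Dict.modify step
lemma pvStep_eq (d : PySem.Dict String (List String)) (cat n : String) :
    (if d.contains cat then d else d.insert cat []).modify cat [] (fun ns => ns ++ [n])
      = d.modify cat [] (fun ns => ns ++ [n]) := by
  by_cases h : d.contains cat = true
  · simp [h]
  · simp only [Bool.not_eq_true] at h
    simp [h, PySem.Dict.modify, PySem.Dict.insert_insert_self, PySem.Dict.getD_insert_self,
          PySem.Dict.getD_of_not_contains d ([] : List String) h]

-- A's grouping loop, rewritten as a modify-loop over (category, name) pairs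
lemma pvCategories_eq (foods : List (List (String × String))) :
    foods.foldl (fun d f =>
      let cat := pvCatOf f
      let d := if d.contains cat then d else d.insert cat []
      d.modify cat [] (fun ns => ns ++ [pvNameOf f])) PySem.Dict.empty
    = (foods.map (fun f => (pvCatOf f, pvNameOf f))).foldl
        (fun d p => d.modify p.1 [] (fun ns => ns ++ [p.2])) PySem.Dict.empty := by
  rw [List.foldl_map]
  have hfun : (fun (d : PySem.Dict String (List String)) f =>
      let cat := pvCatOf f
      let d := if d.contains cat then d else d.insert cat []
      d.modify cat [] (fun ns => ns ++ [pvNameOf f]))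
    = (fun d f => d.modify (pvCatOf f) [] (fun ns => ns ++ [pvNameOf f])) := by
    funext d f; exact pvStep_eq d (pvCatOf f) (pvNameOf f)
  rw [hfun]

-- ===== VERDICT (by name: the statement is the Claim_ definition above) =====
theorem build_food_list_for_prompt_spec : Claim_equal_build_food_list_for_prompt := by
  intro foods _ _
  unfold Spec_build_food_list_for_prompt build_food_list_for_prompt build_food_list_for_prompt_alt
  dsimp only
  rw [pvCategories_eq]
  set P := foods.map (fun f => (pvCatOf f, pvNameOf f)) with hP
  set D := P.foldl (fun d p => d.modify p.1 [] (fun ns => ns ++ [p.2])) PySem.Dict.empty with hD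
  have hnd : D.keys.Nodup := by
    rw [hD]
    exact PySem.Dict.nodup_keys_foldl_modify_key P (fun p => p.1) [] (fun _ p ns => ns ++ [p.2])
      PySem.Dict.empty (by simp)
  have hkeys : D.keys = PySem.Set.ofList (foods.map pvCatOf) := by
    rw [hD, PySem.Dict.keys_foldl_modify_key P (fun p => p.1) [] (fun _ p ns => ns ++ [p.2])
      PySem.Dict.empty]
    simp [PySem.Set.update_nil_left, hP, List.map_map, Function.comp_def]
  have hgetD : ∀ c, D.getD c [] = (foods.filter (fun f => pvCatOf f == c)).map pvNameOf := by
    intro c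
    rw [hD, PySem.Dict.getD_foldl_modify_append P PySem.Dict.empty c]
    simp [hP, List.filter_map, Function.comp_def, List.map_map]
  rw [PySem.Dict.items_eq_map_keys D hnd ([] : List String), hkeys, List.map_map]
  simp only [Function.comp_def, hgetD]
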